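-- pv_equiv track=rewrite | github.com/poonamangne/Programming-Exercises-1 | Chapter06_29.py | sumOfDoubleEvenPlace
-- ===== SOURCE A (Python) =====
-- def sumOfDoubleEvenPlace(number):
--     size = getSize(number) # Get number of digits in the number
--     sumOfDoubleEvenPlaceDigits = 0
--     for i in range(1, size + 1):
--         digit = number % 10
--         number = number // 10
--         if i % 2 == 0: # Check if even place digit
--             digit = digit * 2 # double the digit
--             sumOfDoubleEvenPlaceDigits += getDigit(digit)
--     return sumOfDoubleEvenPlaceDigits
--
-- def getDigit(number):
--     sumOfDigits = 0
--     if number % 10 == number: # Check if single digit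
--         return number
--     else: # split digits and return their sum
--         while number > 0:
--             digit = number % 10
--             number = number // 10
--             sumOfDigits += digit
--         return sumOfDigits
--
-- def getSize(d):
--     count = 0 # Count the number of digits
--     while d > 0:
--         d = d // 10
--         count += 1
--     return count
-- ===== SOURCE B (Python) =====
-- def sumOfDoubleEvenPlace(number):
--     # One pass, two digits at a time: no digit-count pre-pass, no parity test,
--     # and the doubled-digit sum folded into the closed form (d if d < 10 else d - 9).
--     total = 0
--     while number > 9:
--         d = 2 * ((number // 10) % 10)
--         total += d if d < 10 else d - 9
--         number //= 100
--     return total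
-- ===== Notes on version B (the rewrite author's own statement) =====
-- stated objective: simpler
-- what changed: Replaced the getSize pre-pass + parity-tested per-digit loop with helper getDigit by a single loop that steps two digits at a time (number //= 100), reading the even-place digit directly and folding the doubled-digit sum into the closed form d if d < 10 else d - 9.
import Mathlib
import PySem

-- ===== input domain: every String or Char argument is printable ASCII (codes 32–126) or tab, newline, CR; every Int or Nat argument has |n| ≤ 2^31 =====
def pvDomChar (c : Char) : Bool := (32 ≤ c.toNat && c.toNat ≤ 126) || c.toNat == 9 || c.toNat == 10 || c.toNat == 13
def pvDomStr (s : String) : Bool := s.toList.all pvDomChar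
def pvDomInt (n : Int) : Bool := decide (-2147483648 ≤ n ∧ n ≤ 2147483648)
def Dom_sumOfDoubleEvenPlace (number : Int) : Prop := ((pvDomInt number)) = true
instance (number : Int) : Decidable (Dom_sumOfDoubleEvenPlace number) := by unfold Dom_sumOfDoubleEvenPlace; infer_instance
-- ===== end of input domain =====

-- B replaces A's getSize pre-pass + parity-tested loop + getDigit helper by one
-- two-digits-per-step loop with the closed form (d if d < 10 else d - 9); same values, simpler.


-- ===== PORT A =====

-- while d > 0: d //= 10; count += 1   (getSize's loop, accumulator `count`)
def getSizeGo (d : Int) (count : Int) : Int :=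
  if h : 0 < d then getSizeGo (PySem.Int.floordiv d 10) (count + 1) else count
termination_by d.toNat
decreasing_by
  rw [PySem.Int.floordiv_eq_ediv_of_pos (by omega : (0:Int) < 10)]
  omega

def getSize (d : Int) : Int := getSizeGo d 0

-- while number > 0: digit = number % 10; number //= 10; sumOfDigits += digit
def getDigitGo (number : Int) (sumOfDigits : Int) : Int :=
  if h : 0 < number then
    getDigitGo (PySem.Int.floordiv number 10) (sumOfDigits + PySem.Int.mod number 10)
  else sumOfDigits
termination_by number.toNat
decreasing_by
  rw [PySem.Int.floordiv_eq_ediv_of_pos (by omega : (0:Int) < 10)]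
  omega

def getDigit (number : Int) : Int :=
  if PySem.Int.mod number 10 == number then number
  else getDigitGo number 0

-- loop body of A's for-loop: state (number, sumOfDoubleEvenPlaceDigits), index i
def stepA (p : Int × Int) (i : Int) : Int × Int :=
  let digit := PySem.Int.mod p.1 10
  let number := PySem.Int.floordiv p.1 10
  if PySem.Int.mod i 2 == 0 then (number, p.2 + getDigit (digit * 2)) else (number, p.2)

def sumOfDoubleEvenPlace (number : Int) : Int :=
  let size := getSize number
  ((PySem.List.pyRange 1 (size + 1) 1).foldl stepA (number, 0)).2

-- ===== PORT B =====

-- while number > 9: d = 2*((number//10)%10); total += d if d < 10 else d - 9; number //= 100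
def altGo (number : Int) (total : Int) : Int :=
  if h : 9 < number then
    let d := 2 * PySem.Int.mod (PySem.Int.floordiv number 10) 10
    altGo (PySem.Int.floordiv number 100) (total + (if d < 10 then d else d - 9))
  else total
termination_by number.toNat
decreasing_by
  rw [PySem.Int.floordiv_eq_ediv_of_pos (by omega : (0:Int) < 100)]
  omega

def sumOfDoubleEvenPlace_alt (number : Int) : Int := altGo number 0

-- ===== PRECONDITION & SPEC =====
def Spec_sumOfDoubleEvenPlace (number : Int) (out : Int) : Prop := out = sumOfDoubleEvenPlace_alt number
instance (number : Int) (out : Int) : Decidable (Spec_sumOfDoubleEvenPlace number out) := by unfold Spec_sumOfDoubleEvenPlace; infer_instance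

-- ===== CLAIM (what is proved, stated in full; the proofs are below) =====
def Claim_equal_sumOfDoubleEvenPlace : Prop := ∀ (number : Int), Dom_sumOfDoubleEvenPlace number → Spec_sumOfDoubleEvenPlace number (sumOfDoubleEvenPlace number)

-- ===== LEMMAS AND PROOFS =====

theorem getSizeGo_nonpos {d : Int} (h : d ≤ 0) (c : Int) : getSizeGo d c = c := by
  rw [getSizeGo]; simp [not_lt.mpr h]

theorem getSizeGo_pos {d : Int} (h : 0 < d) (c : Int) :
    getSizeGo d c = getSizeGo (PySem.Int.floordiv d 10) (c + 1) := by
  rw [getSizeGo]; simp [h]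

theorem getSizeGo_acc (d : Int) : ∀ c : Int, getSizeGo d c = getSizeGo d 0 + c := by
  by_cases h : 0 < d
  · intro c
    have ih := getSizeGo_acc (PySem.Int.floordiv d 10)
    rw [getSizeGo_pos h, getSizeGo_pos h, ih (c + 1), ih (0 + 1)]
    ring
  · intro c; rw [getSizeGo_nonpos (by omega), getSizeGo_nonpos (by omega)]; ring
termination_by d.toNat
decreasing_by
  rw [PySem.Int.floordiv_eq_ediv_of_pos (by omega : (0:Int) < 10)]
  omega

theorem getSize_nonneg (d : Int) : 0 ≤ getSize d := by
  unfold getSize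
  by_cases h : 0 < d
  · rw [getSizeGo_pos h, getSizeGo_acc]
    have := getSize_nonneg (PySem.Int.floordiv d 10)
    unfold getSize at this; omega
  · rw [getSizeGo_nonpos (by omega)]
termination_by d.toNat
decreasing_by
  rw [PySem.Int.floordiv_eq_ediv_of_pos (by omega : (0:Int) < 10)]
  omega

theorem getSize_succ {d : Int} (h : 0 < d) :
    getSize d = getSize (PySem.Int.floordiv d 10) + 1 := by
  unfold getSize
  rw [getSizeGo_pos h, getSizeGo_acc, zero_add]

-- the index list of A's loop for a size s ≥ 0
theorem pyRange_one_to (s : Nat) :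
    PySem.List.pyRange 1 ((s : Int) + 1) 1 = (List.range s).map (fun k : Nat => 1 + (k : Int)) := by
  rw [PySem.List.pyRange_of_pos 1 ((s : Int) + 1) (by omega)]
  rcases Nat.eq_zero_or_pos s with hs | hs
  · subst hs; simp
  · rw [if_pos (by omega : (1 : Int) < (s : Int) + 1)]
    have hc : (((s : Int) + 1 - 1 + 1 - 1) / 1).toNat = s := by omega
    rw [hc]
    apply List.map_congr_left
    intro k _
    ring

-- getDigit of a doubled digit is the closed form B uses
theorem getDigit_double {m : Int} (h0 : 0 ≤ m) (h9 : m < 10) :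
    getDigit (m * 2) = (if 2 * m < 10 then 2 * m else 2 * m - 9) := by
  interval_cases m <;> simp [getDigit, getDigitGo, PySem.Int.mod, PySem.Int.floordiv]

-- one fold step of A on a state whose first component is positive ≥ 10 is handled in the
-- main induction; here: parity of the index is all stepA looks at
theorem stepA_shift (p : Int × Int) (k : Int) : stepA p (3 + k) = stepA p (1 + k) := by
  unfold stepA
  have : PySem.Int.mod (3 + k) 2 = PySem.Int.mod (1 + k) 2 := by
    rw [PySem.Int.mod_eq_emod_of_pos (by omega), PySem.Int.mod_eq_emod_of_pos (by omega)]
    omega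
  rw [this]

theorem floordiv_floordiv (n : Int) (h : 0 < n) :
    PySem.Int.floordiv (PySem.Int.floordiv n 10) 10 = PySem.Int.floordiv n 100 := by
  rw [PySem.Int.floordiv_eq_ediv_of_pos (show (0:Int) < 10 by omega),
      PySem.Int.floordiv_eq_ediv_of_pos (show (0:Int) < 10 by omega),
      PySem.Int.floordiv_eq_ediv_of_pos (show (0:Int) < 100 by omega)]
  omega

-- main loop correspondence, by strong induction on the digit count
theorem loop_eq (s : Nat) : ∀ (n acc : Int), getSize n = (s : Int) →
    (((List.range s).map (fun k : Nat => 1 + (k : Int))).foldl stepA (n, acc)).2 = altGo n acc := by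
  induction s using Nat.strong_induction_on with
  | _ s ih =>
    intro n acc hs
    match s, ih with
    | 0, _ =>
      have hn : n ≤ 0 := by
        by_contra h
        rw [getSize_succ (by omega)] at hs
        have := getSize_nonneg (PySem.Int.floordiv n 10)
        omega
      rw [altGo.eq_def, dif_neg (by omega : ¬ 9 < n)]
      simp
    | 1, _ =>
      have hn : 0 < n := by
        by_contra h
        rw [show getSize n = 0 from getSizeGo_nonpos (by omega) 0] at hs
        omega
      have h10 : PySem.Int.floordiv n 10 ≤ 0 := by
        by_contra h
        rw [getSize_succ hn, getSize_succ (by omega)] at hs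
        have := getSize_nonneg (PySem.Int.floordiv (PySem.Int.floordiv n 10) 10)
        omega
      have hn9 : n ≤ 9 := by
        rw [PySem.Int.floordiv_eq_ediv_of_pos (by omega)] at h10
        omega
      rw [altGo.eq_def, dif_neg (by omega : ¬ 9 < n)]
      simp [stepA]
    | (s + 2), ih =>
      have hn : 0 < n := by
        by_contra h
        rw [show getSize n = 0 from getSizeGo_nonpos (by omega) 0] at hs
        omega
      have hq : 0 < PySem.Int.floordiv n 10 := by
        by_contra h
        rw [getSize_succ hn, show getSize (PySem.Int.floordiv n 10) = 0 from
          getSizeGo_nonpos (by omega) 0] at hs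
        omega
      have hn10 : 10 ≤ n := by
        rw [PySem.Int.floordiv_eq_ediv_of_pos (by omega)] at hq
        omega
      have hsz : getSize (PySem.Int.floordiv n 100) = (s : Int) := by
        rw [getSize_succ hn, getSize_succ hq, floordiv_floordiv n hn] at hs
        push_cast at hs ⊢
        omega
      -- peel the first two indices 1, 2 off the range
      have hrange : (List.range (s + 2)).map (fun k : Nat => 1 + (k : Int)) =
          1 :: 2 :: (List.range s).map (fun k : Nat => 3 + (k : Int)) := by
        rw [List.range_succ_eq_map, List.range_succ_eq_map]
        simp only [List.map_cons, List.map_map, List.cons.injEq]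
        refine ⟨by norm_num, by norm_num, ?_⟩
        apply List.map_congr_left
        intro k _
        simp only [Function.comp_apply, Nat.succ_eq_add_one]
        push_cast
        ring
      rw [hrange]
      simp only [List.foldl_cons]
      -- the two peeled steps
      have hstep1 : stepA (n, acc) 1 = (PySem.Int.floordiv n 10, acc) := by
        unfold stepA
        simp
      set m := PySem.Int.mod (PySem.Int.floordiv n 10) 10 with hm
      have hm0 : 0 ≤ m := PySem.Int.mod_nonneg _ (by omega)
      have hm9 : m < 10 := PySem.Int.mod_lt _ (by omega)
      have hstep2 : stepA (PySem.Int.floordiv n 10, acc) 2 =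
          (PySem.Int.floordiv n 100, acc + (if 2 * m < 10 then 2 * m else 2 * m - 9)) := by
        unfold stepA
        simp only [show PySem.Int.mod 2 2 = 0 from by decide, BEq.rfl, if_true]
        rw [floordiv_floordiv n hn, ← hm, getDigit_double hm0 hm9]
      rw [hstep1, hstep2]
      -- shift the remaining indices down by 2 (parity is unchanged)
      have hshift : ∀ (p : Int × Int),
          (((List.range s).map (fun k : Nat => 3 + (k : Int))).foldl stepA p) =
          (((List.range s).map (fun k : Nat => 1 + (k : Int))).foldl stepA p) := by
        intro p
        rw [List.foldl_map, List.foldl_map]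
        apply PySem.List.foldl_congr_mem
        intro acc' x _
        exact stepA_shift acc' (x : Int)
      rw [hshift]
      rw [ih s (by omega) _ _ hsz]
      -- unfold B one step on the right
      conv_rhs => rw [altGo.eq_def]
      rw [dif_pos (show 9 < n by omega)]

-- ===== VERDICT (by name: the statement is the Claim_ definition above) =====
theorem sumOfDoubleEvenPlace_spec : Claim_equal_sumOfDoubleEvenPlace := by
  intro number _
  unfold Spec_sumOfDoubleEvenPlace sumOfDoubleEvenPlace sumOfDoubleEvenPlace_alt
  have hnn : 0 ≤ getSize number := getSize_nonneg number
  have hs : getSize number = ((getSize number).toNat : Int) := by omega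
  rw [hs]
  show ((PySem.List.pyRange 1 (((getSize number).toNat : Int) + 1) 1).foldl stepA (number, 0)).2 =
    altGo number 0
  rw [pyRange_one_to]
  exact loop_eq (getSize number).toNat number 0 hs
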